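-- pv_equiv track=rewrite | github.com/duandy18/wms-du | app/api/routers/orders_availability_routes.py | _parse_ids
-- ===== SOURCE A (Python) =====
-- from typing import List, Optional
--
-- def _parse_ids(csv: Optional[str]) -> List[int]:
--     if not csv:
--         return []
--     out: List[int] = []
--     seen: set[int] = set()
--     for part in str(csv).split(","):
--         part = part.strip()
--         if not part:
--             continue
--         try:
--             v = int(part)
--         except Exception:
--             continue
--         if v <= 0 or v in seen:
--             continue
--         seen.add(v)
--         out.append(v)
--     return out
-- ===== SOURCE B (Python) =====
-- def _to_pos_int(part):
--     try:
--         v = int(part)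
--     except ValueError:
--         return None
--     return v if v > 0 else None
--
--
-- def _dedup(vals):
--     if not vals:
--         return []
--     head = vals[0]
--     return [head] + [v for v in _dedup(vals[1:]) if v != head]
--
--
-- def _parse_ids(csv):
--     if not csv:
--         return []
--     vals = [v for v in (_to_pos_int(p.strip()) for p in str(csv).split(",")) if v is not None]
--     return _dedup(vals)
-- ===== Notes on version B (the rewrite author's own statement) =====
-- stated objective: simpler
-- what changed: A is one imperative loop with continue-chains and an explicit seen-set; B is a functional pipeline: a per-token helper returning Optional (int() itself rejects empty/blank tokens, so no explicit empty check), a comprehension collecting the valid positive ints, and a recursive keep-first dedup that filters the head out of the deduped tail instead of maintaining a seen-set.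
import Mathlib
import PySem

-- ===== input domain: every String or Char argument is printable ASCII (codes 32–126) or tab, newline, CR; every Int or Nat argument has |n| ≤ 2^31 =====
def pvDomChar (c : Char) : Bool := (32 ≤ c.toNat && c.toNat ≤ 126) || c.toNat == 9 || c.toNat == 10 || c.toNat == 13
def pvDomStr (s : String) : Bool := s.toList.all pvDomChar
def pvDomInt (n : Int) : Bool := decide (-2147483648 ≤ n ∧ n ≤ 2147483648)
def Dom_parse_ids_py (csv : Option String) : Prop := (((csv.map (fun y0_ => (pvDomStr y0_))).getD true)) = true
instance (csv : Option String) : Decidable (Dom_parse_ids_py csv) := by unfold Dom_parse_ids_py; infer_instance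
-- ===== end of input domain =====

-- B replaces A's imperative loop with continue-chains and a seen-set by a functional
-- pipeline: a per-token Optional parser, a comprehension, and a recursive keep-first dedup.

-- ===== PORT A =====
-- s.split(","): sep is the nonempty ",", so PySem.Str.split? always returns some; getD [] is exact.
def parse_ids_py (csv : Option String) : List Int :=
  match csv with
  | none => []
  | some s =>
    if s = "" then []
    else
      (((PySem.Str.split? s ",").getD []).foldl
        (fun (st : List Int × PySem.Set Int) part =>
          let part := PySem.Str.strip part
          if part = "" then st
          else
            match PySem.Int.ofStr? part with
            | none => st
            | some v =>
              if v ≤ 0 || st.2.contains v then st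
              else (st.1 ++ [v], PySem.Set.add st.2 v))
        ([], PySem.Set.empty)).1

-- ===== PORT B =====
-- _to_pos_int: int(part) (ValueError → None), then keep only v > 0.
def pvToPosInt (part : String) : Option Int :=
  match PySem.Int.ofStr? part with
  | none => none
  | some v => if v > 0 then some v else none

-- _dedup: recursive keep-first dedup, filtering the head out of the deduped tail.
def pvDedup : List Int → List Int
  | [] => []
  | head :: rest => head :: (pvDedup rest).filter (fun v => v != head)

def parse_ids_py_alt (csv : Option String) : List Int :=
  match csv with
  | none => []
  | some s =>
    if s = "" then []
    else
      let vals := (((PySem.Str.split? s ",").getD []).map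
        (fun p => pvToPosInt (PySem.Str.strip p))).filterMap id
      pvDedup vals

-- ===== PRECONDITION & SPEC =====
def Spec_parse_ids_py (csv : Option String) (out : List Int) : Prop := out = parse_ids_py_alt csv
instance (csv : Option String) (out : List Int) : Decidable (Spec_parse_ids_py csv out) := by unfold Spec_parse_ids_py; infer_instance

-- ===== CLAIM (what is proved, stated in full; the proofs are below) =====
def Claim_equal_parse_ids_py : Prop := ∀ (csv : Option String), Dom_parse_ids_py csv → Spec_parse_ids_py csv (parse_ids_py csv)

-- ===== LEMMAS AND PROOFS =====

/-- The (possibly empty) token a single CSV part contributes: [] or one positive int. -/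
def pvTok (part : String) : List Int :=
  (pvToPosInt (PySem.Str.strip part)).toList

theorem pvOfStrEmpty : PySem.Int.ofStr? "" = none := by decide

theorem pvStepA (s : PySem.Set Int) (part : String) :
    (if PySem.Str.strip part = "" then ((s : List Int), (s : PySem.Set Int))
     else
       match PySem.Int.ofStr? (PySem.Str.strip part) with
       | none => ((s : List Int), (s : PySem.Set Int))
       | some v =>
         if v ≤ 0 || PySem.Set.contains s v then ((s : List Int), (s : PySem.Set Int))
         else (s ++ [v], PySem.Set.add s v))
    = (PySem.Set.update s (pvTok part), PySem.Set.update s (pvTok part)) := by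
  simp only [pvTok, pvToPosInt]
  by_cases h1 : PySem.Str.strip part = ""
  · simp [h1, pvOfStrEmpty, PySem.Set.update]
  · simp only [if_neg h1]
    cases hv : PySem.Int.ofStr? (PySem.Str.strip part) with
    | none => simp [PySem.Set.update]
    | some v =>
      by_cases hle : v ≤ 0
      · have : ¬ v > 0 := by omega
        simp [hle, this, PySem.Set.update]
      · have hgt : v > 0 := by omega
        by_cases hm : v ∈ s
        · simp [hle, hgt, hm, PySem.Set.update, PySem.Set.add, PySem.Set.contains]
        · simp [hle, hgt, hm, PySem.Set.update, PySem.Set.add, PySem.Set.contains]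

theorem pvLoopA (parts : List String) (s : PySem.Set Int) :
    parts.foldl
      (fun (st : List Int × PySem.Set Int) part =>
        if PySem.Str.strip part = "" then st
        else
          match PySem.Int.ofStr? (PySem.Str.strip part) with
          | none => st
          | some v =>
            if v ≤ 0 || st.2.contains v then st
            else (st.1 ++ [v], PySem.Set.add st.2 v)) (s, s)
    = (PySem.Set.update s (parts.flatMap pvTok), PySem.Set.update s (parts.flatMap pvTok)) := by
  induction parts generalizing s with
  | nil => simp [PySem.Set.update]
  | cons part rest ih =>
    rw [List.foldl_cons]
    dsimp only
    rw [pvStepA, ih, List.flatMap_cons, PySem.Set.update_append]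

/-- B's comprehension over Optional tokens is the flatMap of per-part token lists. -/
theorem pvVals (parts : List String) :
    ((parts.map (fun p => pvToPosInt (PySem.Str.strip p))).filterMap id)
    = parts.flatMap pvTok := by
  induction parts with
  | nil => rfl
  | cons p rest ih =>
    rw [List.map_cons, List.filterMap_cons, List.flatMap_cons, ih, pvTok]
    generalize pvToPosInt (PySem.Str.strip p) = o
    cases o with
    | none => rfl
    | some v => rfl

/-- The recursive keep-first dedup computes exactly set-insertion order (ofList). -/
theorem pvDedup_eq_ofList (xs : List Int) : pvDedup xs = PySem.Set.ofList xs := by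
  induction xs with
  | nil => rfl
  | cons v rest ih =>
    have h : PySem.Set.ofList (v :: rest) = PySem.Set.update (PySem.Set.add [] v) rest := by
      rw [← PySem.Set.update_nil_left, PySem.Set.update_cons]
    rw [pvDedup, ih, h]
    have hadd : PySem.Set.add ([] : PySem.Set Int) v = [v] := rfl
    rw [hadd, PySem.Set.update_eq_append_filter]
    have hp : (fun x : Int => x != v) = (fun y : Int => !(PySem.Set.contains [v] y)) := by
      funext x
      rcases eq_or_ne x v with h | h <;> simp [h, PySem.Set.contains]
    simp [hp]

-- ===== VERDICT (by name: the statement is the Claim_ definition above) =====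
theorem parse_ids_py_spec : Claim_equal_parse_ids_py := by
  intro csv _
  unfold Spec_parse_ids_py parse_ids_py parse_ids_py_alt
  cases csv with
  | none => rfl
  | some s =>
    by_cases hs : s = ""
    · simp [hs]
    · simp only [if_neg hs, PySem.Set.empty]
      rw [pvLoopA, pvVals, pvDedup_eq_ofList, PySem.Set.update_nil_left]
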